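-- pv_equiv track=rewrite | github.com/Keithagy/dsa-system-design | courses/last-course-youll-need/001_search/003_crystal_ball_problem.py | crystalBallProblem
-- ===== SOURCE A (Python) =====
-- from typing import List
-- import math
--
-- def crystalBallProblem(breaks: List[bool]) -> int:
--     n = len(breaks)
--     step = int(math.sqrt(n))
--
--     last_not_broken = 0
--     for i in range(n, step):
--         if breaks[i]:
--             break
--         last_not_broken = i
--     for j in range(last_not_broken, n, 1):
--         if breaks[j]:
--             return j
--     return -1
-- ===== SOURCE B (Python) =====
-- from typing import List
--
-- def crystalBallProblem(breaks: List[bool]) -> int: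
--     # Right-to-left sweep: walk the list backwards, remembering the index of the
--     # most recently seen True; after the whole sweep that is the FIRST True
--     # overall, or -1 if there is none. (A scans left-to-right with early exit.)
--     ans = -1
--     for i, b in reversed(list(enumerate(breaks))):
--         if b:
--             ans = i
--     return ans
-- ===== Notes on version B (the rewrite author's own statement) =====
-- stated objective: alternative
-- what changed: A's forward scan with early return (preceded by a dead range(n, step) loop) is replaced by a single right-to-left fold over the enumerated list that keeps overwriting the answer with each True index seen, so the final accumulator is the leftmost True index, -1 if none.
import Mathlib
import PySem

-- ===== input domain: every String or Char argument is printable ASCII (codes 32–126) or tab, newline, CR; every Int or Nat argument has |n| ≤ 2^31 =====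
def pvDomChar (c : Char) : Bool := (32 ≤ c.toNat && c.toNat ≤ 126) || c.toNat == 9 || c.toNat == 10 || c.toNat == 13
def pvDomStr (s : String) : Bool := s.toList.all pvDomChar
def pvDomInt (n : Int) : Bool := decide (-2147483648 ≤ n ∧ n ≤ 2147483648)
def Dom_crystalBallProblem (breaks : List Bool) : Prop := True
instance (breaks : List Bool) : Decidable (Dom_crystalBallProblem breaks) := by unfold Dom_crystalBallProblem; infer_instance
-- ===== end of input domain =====

-- B replaces A's forward early-exit scan (with a dead range(n, step) first loop)
-- by a right-to-left fold over the enumerated list that keeps the last True index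
-- seen, i.e. the leftmost True overall: same value, a genuinely different sweep.


-- ===== PORT A =====
-- first loop: 'for i in range(n, step): if breaks[i]: break; last_not_broken = i'
-- (breaks[i] via pyGet?; the .getD false never fires on admitted inputs since every
-- visited index is in range — in fact this range is always empty)
def pvALoop1 (bs : List Bool) : List Int → Int → Int
  | [], last => last
  | i :: rest, last =>
    if (PySem.List.pyGet? bs i).getD false then last else pvALoop1 bs rest i

-- second loop: 'for j in range(last_not_broken, n, 1): if breaks[j]: return j'
def pvALoop2 (bs : List Bool) : List Int → Int
  | [] => -1
  | j :: rest =>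
    if (PySem.List.pyGet? bs j).getD false then j else pvALoop2 bs rest

def crystalBallProblem (breaks : List Bool) : Int :=
  let n : Int := breaks.length
  -- int(math.sqrt(n)) ported as Nat.sqrt: exact for every feasible list length
  let step : Int := (Nat.sqrt breaks.length : Int)
  let last_not_broken : Int := pvALoop1 breaks (PySem.List.pyRange n step 1) 0
  pvALoop2 breaks (PySem.List.pyRange last_not_broken n 1)

-- ===== PORT B =====
-- 'ans = -1; for i, b in reversed(list(enumerate(breaks))): if b: ans = i; return ans'
def crystalBallProblem_alt (breaks : List Bool) : Int :=
  (PySem.List.enumerate breaks 0).reverse.foldl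
    (fun ans p => if p.2 then p.1 else ans) (-1)

-- ===== PRECONDITION & SPEC =====
def Spec_crystalBallProblem (breaks : List Bool) (out : Int) : Prop := out = crystalBallProblem_alt breaks
instance (breaks : List Bool) (out : Int) : Decidable (Spec_crystalBallProblem breaks out) := by unfold Spec_crystalBallProblem; infer_instance

-- ===== CLAIM (what is proved, stated in full; the proofs are below) =====
def Claim_equal_crystalBallProblem : Prop := ∀ (breaks : List Bool), Dom_crystalBallProblem breaks → Spec_crystalBallProblem breaks (crystalBallProblem breaks)

-- ===== LEMMAS AND PROOFS =====

-- A's second loop, started at index k, computes k + index of first True in (bs.drop k).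
theorem pvALoop2_eq_index (bs : List Bool) (k : Nat) :
    pvALoop2 bs (PySem.List.pyRange (k : Int) (bs.length : Int) 1) =
      match PySem.List.index? (bs.drop k) true with
      | some i => Int.ofNat (k + i)
      | none => -1 := by
  by_cases h : k < bs.length
  · rw [PySem.List.pyRange_one_cons (by exact_mod_cast h)]
    have hget : PySem.List.pyGet? bs (k : Int) = some bs[k] := by
      simp [PySem.List.pyGet?, PySem.List.pyIdx?, h]
    have hdrop : bs.drop k = bs[k] :: bs.drop (k + 1) :=
      List.drop_eq_getElem_cons h
    have hk1 : ((k : Int) + 1) = ((k + 1 : Nat) : Int) := by push_cast; ring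
    have IH := pvALoop2_eq_index bs (k + 1)
    rw [pvALoop2, hget, hdrop]
    by_cases hb : bs[k] = true
    · rw [hb, PySem.List.index?_cons_self]
      simp
    · have hb' : bs[k] = false := by simpa using hb
      rw [hb', PySem.List.index?_cons_of_ne (x := false) (v := true) (xs := bs.drop (k+1)) (by simp)]
      simp only [Option.getD_some, Bool.false_eq_true, if_false]
      rw [hk1, IH]
      cases hi : PySem.List.index? (bs.drop (k + 1)) true with
      | none => simp
      | some i => simp only [Option.map_some]; ring_nf
  · rw [PySem.List.pyRange_one_eq_nil (by exact_mod_cast Nat.le_of_not_lt h)]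
    rw [List.drop_eq_nil_of_le (Nat.le_of_not_lt h)]
    rw [show PySem.List.index? ([] : List Bool) true = none from rfl]
    rfl
termination_by bs.length - k

-- B's backward fold over 'enumerate bs s' lands on s + (first True index), else keeps ans.
theorem pvBLoop_eq_index (bs : List Bool) (s ans : Int) :
    (PySem.List.enumerate bs s).reverse.foldl
        (fun ans p => if p.2 then p.1 else ans) ans =
      match PySem.List.index? bs true with
      | some i => s + (i : Int)
      | none => ans := by
  induction bs generalizing s with
  | nil => rfl
  | cons x t ih =>
    rw [PySem.List.enumerate_cons, List.reverse_cons, List.foldl_append, ih]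
    cases x with
    | true =>
      rw [PySem.List.index?_cons_self]
      simp [List.foldl]
    | false =>
      rw [PySem.List.index?_cons_of_ne (x := false) (v := true) (xs := t) (by simp)]
      cases h : PySem.List.index? t true with
      | none => simp [List.foldl]
      | some i =>
        simp only [Option.map_some, List.foldl_cons, List.foldl_nil,
          Bool.false_eq_true, if_false]
        push_cast; ring

theorem crystalBallProblem_spec : Claim_equal_crystalBallProblem := by
  intro bs _
  unfold Spec_crystalBallProblem crystalBallProblem crystalBallProblem_alt
  simp only []
  have hstep : ((Nat.sqrt bs.length : Nat) : Int) ≤ (bs.length : Int) := by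
    exact_mod_cast Nat.sqrt_le_self bs.length
  rw [PySem.List.pyRange_one_eq_nil hstep]
  have h0 := pvALoop2_eq_index bs 0
  simp only [Nat.cast_zero] at h0
  rw [pvALoop1, h0, List.drop_zero, pvBLoop_eq_index]
  cases PySem.List.index? bs true <;> simp
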